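-- pv_equiv track=rewrite | github.com/berezhko/et2 | src/out_connect/montage_cable.py | get_depth_jumpers
-- ===== SOURCE A (Python) =====
-- def get_depth_jumpers(jumped_wires):
--     result = {}
--     for wire in jumped_wires:
--         jumped_clemms = jumped_wires[wire]
--         for i in range(1, len(jumped_wires)+1):
--             depth = str(i) # Проверяем подходит ли данная глубина для нашей перемычки клемм (jumped_clemms)
--             if depth in result:
--                 # Наша первая клемма в перемычке (jumped_clemms) больше последней клемма последней перемычки для данной глубины.
--                 if result[depth][-1][-1] < jumped_clemms[0]:
--                     result[depth].append(jumped_clemms) # Глубина подошла, вставляем нашу перемычку последней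
--                     break
--             else: # Ни одна глубина нам не подошла, значим опускаемся еще ниже и инициализируем следующий уровень глубины нашей перемычкой (jumped_clemms)
--                 result[depth] = []
--                 result[depth].append(jumped_clemms)
--                 break
--     return result
-- ===== SOURCE B (Python) =====
-- def get_depth_jumpers(jumped_wires):
--     # segment-tree first-fit: leftmost depth whose last clemm < wire's first clemm
--     vals = list(jumped_wires.values())
--     n = len(vals)
--     if n == 0:
--         return {}
--     SENT = -(2 ** 32)  # below any admissible clemm: an unused depth always accepts
--
--     def build(size):
--         if size == 1:
--             return ('L', SENT)
--         half = size // 2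
--         return ('N', SENT, half, build(half), build(size - half))
--
--     def find(t, c):
--         # leftmost leaf index with value < c (the tree min is < c)
--         if t[0] == 'L':
--             return 0
--         if t[3][1] < c:
--             return find(t[3], c)
--         return t[2] + find(t[4], c)
--
--     def update(t, i, v):
--         if t[0] == 'L':
--             return ('L', v)
--         if i < t[2]:
--             l = update(t[3], i, v)
--             return ('N', min(l[1], t[4][1]), t[2], l, t[4])
--         r = update(t[4], i - t[2], v)
--         return ('N', min(t[3][1], r[1]), t[2], t[3], r)
--
--     tree = build(n)
--     levels = []
--     for clemms in vals:
--         i = find(tree, clemms[0])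
--         if i == len(levels):
--             levels.append([clemms])
--         else:
--             levels[i].append(clemms)
--         tree = update(tree, i, clemms[-1])
--     return {str(i + 1): lv for i, lv in enumerate(levels)}
-- ===== Notes on version B (the rewrite author's own statement) =====
-- stated objective: faster
-- what changed: Replaces A's per-wire linear first-fit scan over depth levels (str(i)-keyed dict membership tests) by a min-segment tree over the depth slots that finds the leftmost fitting depth by descent and is point-updated; Pre_ excludes empty clemm lists (A raises IndexError on all but the degenerate single-wire input) and duplicate wire keys (impossible in a Python dict argument).
-- outside the precondition, e.g. on get_depth_jumpers({1: []}): A returns {'1': [[]]}, B raises IndexError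
import Mathlib
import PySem

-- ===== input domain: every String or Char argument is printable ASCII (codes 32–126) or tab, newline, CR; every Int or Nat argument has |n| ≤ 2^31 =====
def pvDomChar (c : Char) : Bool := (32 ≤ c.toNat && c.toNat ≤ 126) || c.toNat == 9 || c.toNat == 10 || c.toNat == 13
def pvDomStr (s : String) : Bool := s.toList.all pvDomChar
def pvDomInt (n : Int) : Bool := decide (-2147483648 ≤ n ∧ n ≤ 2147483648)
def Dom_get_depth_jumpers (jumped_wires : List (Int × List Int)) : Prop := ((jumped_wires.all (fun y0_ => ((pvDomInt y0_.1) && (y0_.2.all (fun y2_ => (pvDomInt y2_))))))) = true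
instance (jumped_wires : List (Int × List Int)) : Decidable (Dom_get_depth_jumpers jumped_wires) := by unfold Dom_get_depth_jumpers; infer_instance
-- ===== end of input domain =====

-- B replaces A's per-wire linear scan of the depth levels (first fit via dict membership
-- tests on str(i) keys) by a min-segment tree over the depth slots, descending to the
-- leftmost slot whose last clemm is below the wire's first clemm; objective: faster.

-- ===== PORT A =====
-- inner 'for i in range(1, len(jumped_wires)+1)' loop with break; the '_ , _ => result'
-- arms are the IndexError cases (empty clemm lists), excluded by Pre_.
def innerA (is : List Int) (result : PySem.Dict String (List (List Int)))
    (clemms : List Int) : PySem.Dict String (List (List Int)) :=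
  match is with
  | [] => result
  | i :: rest =>
    let depth := PySem.Int.toStr i
    if result.contains depth then
      -- result[depth][-1][-1] < jumped_clemms[0]
      match (PySem.List.pyGet? (result.getD depth []) (-1)).bind
              (fun last => PySem.List.pyGet? last (-1)),
            PySem.List.pyGet? clemms 0 with
      | some lastv, some c0 =>
        if lastv < c0 then result.modify depth [] (fun l => l ++ [clemms])
        else innerA rest result clemms
      | _, _ => result
    else
      (result.insert depth []).modify depth [] (fun l => l ++ [clemms])

-- 'for wire in jumped_wires: jumped_clemms = jumped_wires[wire]' iterates the dict's
-- (key, value) pairs in order; since a Python dict has unique keys (Pre_ keeps the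
-- association list that way), jumped_wires[wire] is exactly the pair's value p.2.
def get_depth_jumpers (jumped_wires : List (Int × List Int)) : List (String × List (List Int)) :=
  (jumped_wires.foldl
    (fun result p =>
      innerA (PySem.List.pyRange 1 ((jumped_wires.length : Int) + 1) 1) result p.2)
    PySem.Dict.empty).items

-- ===== PORT B =====
-- functional min-segment tree: ('L', v) / ('N', min, left_size, left, right) in Source B
inductive Seg where
  | leaf (v : Int)
  | node (mn : Int) (lsz : Nat) (l r : Seg)
deriving Repr, DecidableEq

def segSent : Int := -(2 ^ 32)

def Seg.mn : Seg → Int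
  | .leaf v => v
  | .node mn _ _ _ => mn

-- Source B build(size); size 0 is never reached in Source B (guarded by n == 0), leaf there for totality
def segBuild : Nat → Seg
  | 0 => .leaf segSent
  | 1 => .leaf segSent
  | (n + 2) => .node segSent ((n + 2) / 2) (segBuild ((n + 2) / 2)) (segBuild ((n + 2) - (n + 2) / 2))
decreasing_by all_goals omega

def segFind : Seg → Int → Nat
  | .leaf _, _ => 0
  | .node _ lsz l r, c => if l.mn < c then segFind l c else lsz + segFind r c

def segUpdate : Seg → Nat → Int → Seg
  | .leaf _, _, v => .leaf v
  | .node _ lsz l r, i, v =>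
    if i < lsz then
      let l' := segUpdate l i v
      .node (min l'.mn r.mn) lsz l' r
    else
      let r' := segUpdate r (i - lsz) v
      .node (min l.mn r'.mn) lsz l r'

-- the body of Source B's 'for clemms in vals' loop; the '_, _ => st' arm is the
-- IndexError of clemms[0]/clemms[-1] on an empty clemm list, excluded by Pre_.
def stepB (st : Seg × List (List (List Int))) (clemms : List Int) :
    Seg × List (List (List Int)) :=
  match PySem.List.pyGet? clemms 0, PySem.List.pyGet? clemms (-1) with
  | some c0, some clast =>
    let i := segFind st.1 c0
    let levels :=
      if i = st.2.length then st.2 ++ [[clemms]]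
      else st.2.modify i (fun lv => lv ++ [clemms])
    (segUpdate st.1 i clast, levels)
  | _, _ => st

def get_depth_jumpers_alt (jumped_wires : List (Int × List Int)) : List (String × List (List Int)) :=
  let vals := jumped_wires.map (·.2)
  if vals.length = 0 then []
  else
    let st := vals.foldl stepB (segBuild vals.length, [])
    (PySem.List.enumerate st.2 0).map (fun p => (PySem.Int.toStr (p.1 + 1), p.2))

-- ===== PRECONDITION & SPEC =====
-- Pre_ excludes empty clemm lists, on which A raises IndexError on all but the degenerate
-- single-wire input, and duplicate wire keys, which a Python dict argument cannot carry.
def Pre_get_depth_jumpers (jumped_wires : List (Int × List Int)) : Prop :=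
  (jumped_wires.map (·.1)).Nodup ∧ ∀ p ∈ jumped_wires, p.2 ≠ []
instance (jumped_wires : List (Int × List Int)) : Decidable (Pre_get_depth_jumpers jumped_wires) := by
  unfold Pre_get_depth_jumpers; infer_instance

def pvWitness_get_depth_jumpers : (List (Int × List Int)) :=
  [(1, [1, 2]), (2, [3, 4]), (3, [2, 5]), (4, [6])]

def Spec_get_depth_jumpers (jumped_wires : List (Int × List Int)) (out : List (String × List (List Int))) : Prop := out = get_depth_jumpers_alt jumped_wires
instance (jumped_wires : List (Int × List Int)) (out : List (String × List (List Int))) : Decidable (Spec_get_depth_jumpers jumped_wires out) := by unfold Spec_get_depth_jumpers; infer_instance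

-- ===== CLAIM (what is proved, stated in full; the proofs are below) =====
def Claim_equal_get_depth_jumpers : Prop := ∀ (jumped_wires : List (Int × List Int)), Dom_get_depth_jumpers jumped_wires → Pre_get_depth_jumpers jumped_wires → Spec_get_depth_jumpers jumped_wires (get_depth_jumpers jumped_wires)

-- ===== LEMMAS AND PROOFS =====


lemma digitChar_val_of_lt (d : Nat) (h : d < 10) : (Nat.digitChar d).toNat = 48 + d := by
  interval_cases d <;> decide

def tdg (n : Nat) : List Char := ((Nat.digits 10 n).map Nat.digitChar).reverse

lemma toDigitsCore_eq (fuel : Nat) : ∀ (n : Nat) (ds : List Char), n < fuel →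
    Nat.toDigitsCore 10 fuel n ds = (if n = 0 then ['0'] else tdg n) ++ ds := by
  induction fuel with
  | zero => omega
  | succ f ih =>
    intro n ds h
    rw [Nat.toDigitsCore]
    by_cases h0 : n / 10 = 0
    · have hn10 : n < 10 := by omega
      simp only [h0, if_pos]
      by_cases hz : n = 0
      · subst hz; simp [Nat.digitChar]
      · rw [if_neg hz]
        have hd : Nat.digits 10 n = [n % 10] := by
          rw [Nat.digits_def' (by norm_num : 1 < 10) (Nat.pos_of_ne_zero hz), h0]
          simp
        simp [tdg, hd, Nat.mod_eq_of_lt hn10]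
    · rw [if_neg h0]
      have hfuel : n / 10 < f := by
        have : 10 ≤ n := by by_contra hc; exact h0 (Nat.div_eq_of_lt (by omega))
        have := Nat.div_lt_self (by omega : 0 < n) (by norm_num : 1 < 10)
        omega
      rw [ih _ _ hfuel, if_neg h0]
      have hz : n ≠ 0 := by intro hz; subst hz; simp at h0
      have hd : Nat.digits 10 n = n % 10 :: Nat.digits 10 (n / 10) :=
        Nat.digits_def' (by norm_num) (Nat.pos_of_ne_zero hz)
      rw [if_neg hz]
      simp [tdg, hd]

lemma toDigits_eq (n : Nat) : Nat.toDigits 10 n = (if n = 0 then ['0'] else tdg n) := by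
  have := toDigitsCore_eq (n + 1) n [] (by omega)
  simpa [Nat.toDigits] using this

lemma toDigits_inj (n m : Nat) (h : Nat.toDigits 10 n = Nat.toDigits 10 m) : n = m := by
  have key : ∀ k : Nat, ((Nat.toDigits 10 k).map (fun c => c.toNat - 48)).reverse
      = if k = 0 then [0] else Nat.digits 10 k := by
    intro k
    rw [toDigits_eq]
    by_cases hz : k = 0
    · subst hz; simp
    · rw [if_neg hz, if_neg hz, tdg]
      rw [List.map_reverse, List.reverse_reverse, List.map_map]
      apply List.map_congr_left ?_ |>.trans (List.map_id _)
      intro d hd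
      have : d < 10 := Nat.digits_lt_base (by norm_num) hd
      simp [Function.comp, digitChar_val_of_lt d this]
  have h2 := congrArg (fun l => (l.map (fun c : Char => c.toNat - 48)).reverse) h
  simp only [key] at h2
  by_cases hn : n = 0 <;> by_cases hm : m = 0 <;> simp [hn, hm] at h2 ⊢
  · -- [0] = digits m, m ≠ 0
    have := Nat.ofDigits_digits 10 m
    rw [← h2] at this; simp [Nat.ofDigits] at this; omega
  · have := Nat.ofDigits_digits 10 n
    rw [h2] at this; simp [Nat.ofDigits] at this; omega
  · exact h2

lemma mem_toDigits_ge (k : Nat) (c : Char) (hc : c ∈ Nat.toDigits 10 k) : 48 ≤ c.toNat := by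
  rw [toDigits_eq] at hc
  by_cases hz : k = 0
  · simp [hz] at hc; subst hc; decide
  · rw [if_neg hz] at hc
    simp [tdg] at hc
    obtain ⟨d, hd, rfl⟩ := hc
    have : d < 10 := Nat.digits_lt_base (by norm_num) hd
    rw [digitChar_val_of_lt d this]; omega

lemma toChars_inj (n m : Int) (h : PySem.Int.toChars n = PySem.Int.toChars m) : n = m := by
  unfold PySem.Int.toChars at h
  by_cases hn : n < 0 <;> by_cases hm : m < 0 <;> simp [hn, hm] at h
  · have := toDigits_inj _ _ h; omega
  · exact absurd (mem_toDigits_ge _ _ (h ▸ List.mem_cons_self)) (by decide)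
  · exact absurd (mem_toDigits_ge _ _ (h.symm ▸ List.mem_cons_self)) (by decide)
  · have := toDigits_inj _ _ h; omega

lemma toStr_inj (n m : Int) (h : PySem.Int.toStr n = PySem.Int.toStr m) : n = m := by
  apply toChars_inj
  have := congrArg String.toList h
  simpa [PySem.Int.toList_toStr] using this

abbrev Lvl := List (List Int)

def lastVal (lv : Lvl) : Int := (lv.getLastD []).getLastD 0

def GoodL (levels : List Lvl) : Prop := ∀ lv ∈ levels, lv ≠ [] ∧ lv.getLastD [] ≠ []

def ff : List Lvl → Int → List Int → List Lvl
  | [], _, c => [[c]]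
  | lv :: rest, c0, c => if lastVal lv < c0 then (lv ++ [c]) :: rest else lv :: ff rest c0 c

def pairsFrom (s : Int) : List Lvl → List (String × Lvl)
  | [] => []
  | lv :: rest => (PySem.Int.toStr (s + 1), lv) :: pairsFrom (s + 1) rest

lemma find?_pairsFrom_none : ∀ (ls : List Lvl) (s t : Int), (t ≤ s ∨ s + ls.length < t) →
    List.find? (fun p => p.1 == PySem.Int.toStr t) (pairsFrom s ls) = none := by
  intro ls
  induction ls with
  | nil => intro s t _; simp [pairsFrom]
  | cons lv rest ih =>
    intro s t ht
    simp only [List.length_cons] at ht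
    have hne : PySem.Int.toStr (s + 1) ≠ PySem.Int.toStr t := by
      intro h; have := toStr_inj _ _ h; omega
    have hb : (PySem.Int.toStr (s + 1) == PySem.Int.toStr t) = false := beq_eq_false_iff_ne.mpr hne
    simp only [pairsFrom, List.find?_cons, hb]
    exact ih (s + 1) t (by omega)

lemma find?_pairsFrom : ∀ (ls : List Lvl) (s : Int) (k : Nat) (hk : k < ls.length),
    List.find? (fun p => p.1 == PySem.Int.toStr (s + k + 1)) (pairsFrom s ls)
      = some (PySem.Int.toStr (s + k + 1), ls[k]) := by
  intro ls
  induction ls with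
  | nil => intro s k hk; simp at hk
  | cons lv rest ih =>
    intro s k hk
    match k with
    | 0 => simp [pairsFrom]
    | j + 1 =>
      have hne : PySem.Int.toStr (s + 1) ≠ PySem.Int.toStr (s + (j + 1 : Nat) + 1) := by
        intro h; have := toStr_inj _ _ h; push_cast at this; omega
      have hb : (PySem.Int.toStr (s + 1) == PySem.Int.toStr (s + (j + 1 : Nat) + 1)) = false :=
        beq_eq_false_iff_ne.mpr hne
      simp only [pairsFrom, List.find?_cons, hb]
      have harith : s + ((j + 1 : Nat) : Int) + 1 = (s + 1) + (j : Nat) + 1 := by push_cast; ring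
      rw [harith]
      rw [ih (s + 1) j (by simpa using Nat.lt_of_succ_lt_succ hk)]
      simp

lemma get?_pairs (ls : List Lvl) (k : Nat) (hk : k < ls.length) :
    (PySem.Dict.mk (pairsFrom 0 ls)).get? (PySem.Int.toStr ((k : Int) + 1)) = some ls[k] := by
  have := find?_pairsFrom ls 0 k hk
  simp only [zero_add] at this
  simp [PySem.Dict.get?, this]

lemma get?_pairs_none (ls : List Lvl) (t : Int) (ht : t ≤ 0 ∨ (ls.length : Int) < t) :
    (PySem.Dict.mk (pairsFrom 0 ls)).get? (PySem.Int.toStr t) = none := by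
  have := find?_pairsFrom_none ls 0 t (by omega)
  simp [PySem.Dict.get?, this]

lemma contains_pairs (ls : List Lvl) (k : Nat) (hk : k < ls.length) :
    (PySem.Dict.mk (pairsFrom 0 ls)).contains (PySem.Int.toStr ((k : Int) + 1)) = true := by
  rw [PySem.Dict.contains_eq_isSome_get?, get?_pairs ls k hk]; rfl

lemma contains_pairs_none (ls : List Lvl) (t : Int) (ht : t ≤ 0 ∨ (ls.length : Int) < t) :
    (PySem.Dict.mk (pairsFrom 0 ls)).contains (PySem.Int.toStr t) = false := by
  rw [PySem.Dict.contains_eq_isSome_get?, get?_pairs_none ls t ht]; rfl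

lemma map_replace_pairs : ∀ (ls : List Lvl) (s : Int) (k : Nat) (v : Lvl), k < ls.length →
    (pairsFrom s ls).map (fun p => if p.1 == PySem.Int.toStr (s + k + 1) then (PySem.Int.toStr (s + k + 1), v) else p)
      = pairsFrom s (ls.set k v) := by
  intro ls
  induction ls with
  | nil => intro s k v hk; simp at hk
  | cons lv rest ih =>
    intro s k v hk
    match k with
    | 0 =>
      simp only [Nat.cast_zero, add_zero, pairsFrom, List.map_cons, beq_self_eq_true, if_pos,
        List.set_cons_zero]
      congr 1
      have hcong : ∀ p ∈ pairsFrom (s + 1) rest,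
          (fun p : String × Lvl => if p.1 == PySem.Int.toStr (s + 1) then (PySem.Int.toStr (s + 1), v) else p) p = p := by
        intro p hp
        have hnone : List.find? (fun q => q.1 == PySem.Int.toStr (s + 1)) (pairsFrom (s + 1) rest) = none :=
          find?_pairsFrom_none rest (s + 1) (s + 1) (by omega)
        have hnp := List.find?_eq_none.mp hnone p hp
        simp only [beq_iff_eq] at hnp
        simp only [beq_iff_eq, if_neg hnp]
      rw [List.map_congr_left hcong]; exact List.map_id _
    | j + 1 =>
      have hne : PySem.Int.toStr (s + 1) ≠ PySem.Int.toStr (s + (j + 1 : Nat) + 1) := by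
        intro h; have := toStr_inj _ _ h; push_cast at this; omega
      have hb : (PySem.Int.toStr (s + 1) == PySem.Int.toStr (s + (j + 1 : Nat) + 1)) = false :=
        beq_eq_false_iff_ne.mpr hne
      simp only [pairsFrom, List.map_cons, hb, if_neg, Bool.false_eq_true, not_false_iff,
        List.set_cons_succ]
      congr 1
      have harith : s + ((j + 1 : Nat) : Int) + 1 = (s + 1) + (j : Nat) + 1 := by push_cast; ring
      rw [harith]
      exact ih (s + 1) j v (by simpa using Nat.lt_of_succ_lt_succ hk)

lemma pairs_append (ls : List Lvl) (v : Lvl) : ∀ s : Int,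
    pairsFrom s ls ++ [(PySem.Int.toStr (s + ls.length + 1), v)] = pairsFrom s (ls ++ [v]) := by
  induction ls with
  | nil => intro s; simp [pairsFrom]
  | cons lv rest ih =>
    intro s
    simp only [pairsFrom, List.cons_append, List.length_cons]
    rw [show s + ((rest.length + 1 : Nat) : Int) + 1 = (s + 1) + rest.length + 1 by push_cast; ring]
    rw [ih (s + 1)]

lemma pyGet?_zero' {α : Type} (l : List α) (d : α) (h : l ≠ []) :
    PySem.List.pyGet? l 0 = some (l.headD d) := by
  cases l with
  | nil => exact absurd rfl h
  | cons x xs => simp [PySem.List.pyGet?, PySem.List.pyIdx?]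

lemma pyGet?_neg_one' {α : Type} (l : List α) (d : α) (h : l ≠ []) :
    PySem.List.pyGet? l (-1) = some (l.getLastD d) := by
  have hlen : 1 ≤ l.length := List.length_pos_of_ne_nil h
  have hg : l.getLast? = some (l.getLastD d) := by
    have hne : l.getLast? ≠ none := by simp [List.getLast?_eq_none_iff, h]
    obtain ⟨x, hx⟩ := Option.ne_none_iff_exists'.mp hne
    rw [hx, List.getLastD_eq_getLast?, hx]; rfl
  simp only [PySem.List.pyGet?, PySem.List.pyIdx?]
  rw [if_neg (by omega), if_pos (by omega)]
  simp only [Option.bind_some]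
  rw [show (-(-1 : Int)).toNat = 1 from rfl]
  rw [← hg, List.getLast?_eq_getElem?]

lemma modify_pairs (ls : List Lvl) (k : Nat) (f : Lvl → Lvl) (hk : k < ls.length) :
    (PySem.Dict.mk (pairsFrom 0 ls)).modify (PySem.Int.toStr ((k : Int) + 1)) [] f
      = PySem.Dict.mk (pairsFrom 0 (ls.set k (f ls[k]))) := by
  unfold PySem.Dict.modify
  rw [PySem.Dict.getD_eq_get?_getD, get?_pairs ls k hk]
  simp only [Option.getD_some]
  unfold PySem.Dict.insert
  rw [contains_pairs ls k hk, if_pos rfl]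
  have := map_replace_pairs ls 0 k (f ls[k]) hk
  simp only [zero_add] at this
  simp only [this]

lemma newlevel_pairs (ls : List Lvl) (c : List Int) :
    ((PySem.Dict.mk (pairsFrom 0 ls)).insert (PySem.Int.toStr ((ls.length : Int) + 1)) []).modify
        (PySem.Int.toStr ((ls.length : Int) + 1)) [] (fun l => l ++ [c])
      = PySem.Dict.mk (pairsFrom 0 (ls ++ [[c]])) := by
  have hins : (PySem.Dict.mk (pairsFrom 0 ls)).insert (PySem.Int.toStr ((ls.length : Int) + 1)) []
      = PySem.Dict.mk (pairsFrom 0 (ls ++ [([] : Lvl)])) := by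
    unfold PySem.Dict.insert
    rw [contains_pairs_none ls ((ls.length : Int) + 1) (by omega)]
    simp only [Bool.false_eq_true, if_neg, not_false_iff]
    have := pairs_append ls [] 0
    simp only [zero_add] at this
    rw [this]
  rw [hins]
  have hk : ls.length < (ls ++ [([] : Lvl)]).length := by simp
  have := modify_pairs (ls ++ [([] : Lvl)]) ls.length (fun l => l ++ [c]) hk
  rw [show ((ls.length : Int) + 1) = (((ls ++ [([] : Lvl)]).length : Nat) : Int) by simp] at this ⊢
  rw [this]
  congr 2
  rw [List.getElem_append_right (le_refl _)]
  simp [List.set_append]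

lemma ff_good (L : List Lvl) (c0 : Int) (c : List Int) (hL : GoodL L) (hc : c ≠ []) :
    GoodL (ff L c0 c) := by
  induction L with
  | nil =>
    intro lv hlv
    simp [ff] at hlv
    subst hlv
    constructor <;> simp [hc]
  | cons lv rest ih =>
    intro x hx
    simp only [ff] at hx
    split at hx
    · rcases List.mem_cons.mp hx with rfl | hx
      · exact ⟨by simp, by rw [List.getLastD_concat]; exact hc⟩
      · exact hL _ (List.mem_cons_of_mem _ hx)
    · rcases List.mem_cons.mp hx with rfl | hx
      · exact hL _ List.mem_cons_self
      · exact ih (fun y hy => hL y (List.mem_cons_of_mem _ hy)) x hx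

lemma ff_len (L : List Lvl) (c0 : Int) (c : List Int) : (ff L c0 c).length ≤ L.length + 1 := by
  induction L with
  | nil => simp [ff]
  | cons lv rest ih => simp only [ff]; split <;> simp <;> omega

lemma innerA_eq : ∀ (suf pre : List Lvl) (c : List Int) (n : Nat),
    c ≠ [] → GoodL suf → pre.length + suf.length < n →
    innerA (PySem.List.pyRange ((pre.length : Int) + 1) ((n : Int) + 1) 1)
        (PySem.Dict.mk (pairsFrom 0 (pre ++ suf))) c
      = PySem.Dict.mk (pairsFrom 0 (pre ++ ff suf (c.headD 0) c)) := by
  intro suf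
  induction suf with
  | nil =>
    intro pre c n hc _ hlen
    simp only [List.length_nil, Nat.add_zero] at hlen
    rw [PySem.List.pyRange_one_cons (show ((pre.length:Nat):Int)+1 < ((n:Nat):Int)+1 by omega)]
    simp only [innerA, List.append_nil]
    rw [contains_pairs_none pre ((pre.length : Int) + 1) (by omega)]
    simp only [Bool.false_eq_true, not_false_iff, ite_false]
    simpa [ff] using newlevel_pairs pre c
  | cons lv rest ih =>
    intro pre c n hc hgood hlen
    simp only [List.length_cons] at hlen
    rw [PySem.List.pyRange_one_cons (show ((pre.length:Nat):Int)+1 < ((n:Nat):Int)+1 by omega)]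
    simp only [innerA]
    have hk : pre.length < (pre ++ lv :: rest).length := by simp
    rw [contains_pairs (pre ++ lv :: rest) pre.length hk]
    rw [if_pos rfl]
    rw [PySem.Dict.getD_eq_get?_getD, get?_pairs (pre ++ lv :: rest) pre.length hk]
    simp only [Option.getD_some]
    have hgetl : (pre ++ lv :: rest)[pre.length] = lv := by
      rw [List.getElem_append_right (le_refl _)]
      simp
    rw [hgetl]
    have hlv := hgood lv List.mem_cons_self
    rw [pyGet?_neg_one' lv [] hlv.1]
    simp only [Option.bind_some]
    rw [pyGet?_neg_one' (lv.getLastD []) 0 hlv.2]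
    rw [pyGet?_zero' c 0 hc]
    show (if lastVal lv < c.headD 0 then _ else _) = _
    by_cases hcmp : lastVal lv < c.headD 0
    · rw [if_pos hcmp]
      have := modify_pairs (pre ++ lv :: rest) pre.length (fun l => l ++ [c]) hk
      rw [hgetl] at this
      rw [this]
      congr 2
      rw [List.set_append]
      simp only [lt_irrefl, if_neg, Nat.sub_self, List.set_cons_zero]
      have hcmp' : lastVal lv < c.head?.getD 0 := by
        rwa [List.headD_eq_head?_getD] at hcmp
      simp [ff, hcmp']
    · rw [if_neg hcmp]
      have harr : (pre.length : Int) + 1 + 1 = ((pre ++ [lv]).length : Int) + 1 := by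
        simp
      have hd : pre ++ lv :: rest = (pre ++ [lv]) ++ rest := by simp
      rw [harr, hd]
      rw [ih (pre ++ [lv]) c n hc (fun y hy => hgood y (List.mem_cons_of_mem _ hy))
        (by simp only [List.length_append, List.length_cons, List.length_nil]; omega)]
      have hcmp' : ¬ lastVal lv < c.head?.getD 0 := by
        rwa [List.headD_eq_head?_getD] at hcmp
      simp [ff, hcmp']


lemma foldA_eq : ∀ (vals : List (List Int)) (levels : List Lvl) (n : Nat),
    (∀ c ∈ vals, c ≠ []) → GoodL levels → levels.length + vals.length ≤ n →
    vals.foldl (fun d c => innerA (PySem.List.pyRange 1 ((n : Int) + 1) 1) d c)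
        (PySem.Dict.mk (pairsFrom 0 levels))
      = PySem.Dict.mk (pairsFrom 0 (vals.foldl (fun L c => ff L (c.headD 0) c) levels)) := by
  intro vals
  induction vals with
  | nil => intro levels n _ _ _; simp
  | cons c cs ih =>
    intro levels n hvc hgood hlen
    simp only [List.foldl_cons]
    have h1 := innerA_eq levels [] c n (hvc c List.mem_cons_self) hgood
      (by simp only [List.length_nil, List.length_cons] at hlen ⊢; omega)
    simp only [List.nil_append, List.length_nil, Nat.cast_zero, zero_add] at h1
    rw [h1]
    exact ih (ff levels (c.headD 0) c) n (fun y hy => hvc y (List.mem_cons_of_mem _ hy))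
      (ff_good _ _ _ hgood (hvc c List.mem_cons_self))
      (by have := ff_len levels (c.headD 0) c
          simp only [List.length_cons] at hlen; omega)

def segToList : Seg → List Int
  | .leaf v => [v]
  | .node _ _ l r => segToList l ++ segToList r

def segWF : Seg → Prop
  | .leaf _ => True
  | .node mn lsz l r => mn = min (Seg.mn l) (Seg.mn r) ∧ lsz = (segToList l).length ∧ segWF l ∧ segWF r

lemma mn_mem (t : Seg) (h : segWF t) : t.mn ∈ segToList t := by
  induction t with
  | leaf v => simp [segToList, Seg.mn]
  | node mn lsz l r ihl ihr =>
    obtain ⟨hmn, -, hl, hr⟩ := h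
    rw [show Seg.mn (Seg.node mn lsz l r) = mn from rfl, hmn]
    simp only [segToList, List.mem_append]
    rcases min_cases (Seg.mn l) (Seg.mn r) with ⟨heq, -⟩ | ⟨heq, -⟩ <;> rw [heq]
    · exact Or.inl (ihl hl)
    · exact Or.inr (ihr hr)

lemma mn_le (t : Seg) (h : segWF t) : ∀ x ∈ segToList t, t.mn ≤ x := by
  induction t with
  | leaf v => intro x hx; simp [segToList] at hx; simp [Seg.mn, hx]
  | node mn lsz l r ihl ihr =>
    obtain ⟨hmn, -, hl, hr⟩ := h
    intro x hx
    simp only [segToList, List.mem_append] at hx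
    rw [show Seg.mn (Seg.node mn lsz l r) = mn from rfl, hmn]
    rcases hx with hx | hx
    · exact le_trans (min_le_left _ _) (ihl hl x hx)
    · exact le_trans (min_le_right _ _) (ihr hr x hx)

lemma segBuild_spec : ∀ n : Nat, 1 ≤ n →
    segToList (segBuild n) = List.replicate n segSent ∧ segWF (segBuild n) := by
  intro n
  induction n using Nat.strong_induction_on with
  | _ n ih =>
    intro hn
    match n with
    | 1 => exact ⟨by simp [segBuild, segToList, List.replicate], by rw [segBuild]; trivial⟩
    | (m + 2) =>
      have h1 := ih ((m + 2) / 2) (by omega) (by omega)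
      have h2 := ih ((m + 2) - (m + 2) / 2) (by omega) (by omega)
      rw [segBuild]
      constructor
      · simp only [segToList, h1.1, h2.1]
        rw [List.replicate_append_replicate]
        have he : (m + 2) / 2 + ((m + 2) - (m + 2) / 2) = m + 2 := by omega
        rw [he]
      · refine ⟨?_, ?_, h1.2, h2.2⟩
        · have hm1 : (segBuild ((m + 2) / 2)).mn = segSent := by
            have := mn_mem _ h1.2
            rw [h1.1] at this
            exact List.eq_of_mem_replicate this
          have hm2 : (segBuild ((m + 2) - (m + 2) / 2)).mn = segSent := by
            have := mn_mem _ h2.2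
            rw [h2.1] at this
            exact List.eq_of_mem_replicate this
          rw [hm1, hm2, min_self]
        · rw [h1.1, List.length_replicate]

lemma segFind_eq (t : Seg) (c : Int) (h : segWF t) (hm : t.mn < c) :
    segFind t c = (segToList t).findIdx (fun x => decide (x < c)) := by
  induction t with
  | leaf v =>
    simp only [Seg.mn] at hm
    simp [segFind, segToList, List.findIdx_cons, hm]
  | node mn lsz l r ihl ihr =>
    obtain ⟨hmn, hlsz, hl, hr⟩ := h
    rw [show Seg.mn (Seg.node mn lsz l r) = mn from rfl, hmn, min_lt_iff] at hm
    simp only [segFind, segToList]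
    rw [List.findIdx_append]
    by_cases hlm : l.mn < c
    · have hlt : (segToList l).findIdx (fun x => decide (x < c)) < (segToList l).length :=
        List.findIdx_lt_length.mpr ⟨l.mn, mn_mem l hl, by simpa using hlm⟩
      rw [if_pos hlm, if_pos hlt]
      exact ihl hl hlm
    · have hrm : r.mn < c := hm.resolve_left hlm
      have hleft : (segToList l).findIdx (fun x => decide (x < c)) = (segToList l).length :=
        List.findIdx_eq_length.mpr (fun x hx => by
          simp only [decide_eq_false_iff_not, not_lt]
          exact le_trans (not_lt.mp hlm) (mn_le l hl x hx))
      rw [if_neg hlm, hleft, if_neg (lt_irrefl _), hlsz]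
      rw [ihr hr hrm]
      omega

lemma segUpdate_spec (t : Seg) (i : Nat) (v : Int) (h : segWF t)
    (hi : i < (segToList t).length) :
    segToList (segUpdate t i v) = (segToList t).set i v ∧ segWF (segUpdate t i v) := by
  induction t generalizing i with
  | leaf w =>
    simp only [segToList, List.length_cons, List.length_nil] at hi
    have : i = 0 := by omega
    subst this
    exact ⟨by simp [segUpdate, segToList], trivial⟩
  | node mn lsz l r ihl ihr =>
    obtain ⟨hmn, hlsz, hl, hr⟩ := h
    simp only [segToList, List.length_append] at hi
    simp only [segUpdate]
    by_cases hilt : i < lsz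
    · rw [if_pos hilt]
      have := ihl i hl (by omega)
      refine ⟨?_, ?_, ?_, this.2, hr⟩
      · simp only [segToList, this.1, List.set_append, hlsz ▸ hilt, if_pos]
      · rfl
      · rw [this.1, List.length_set, hlsz]
    · rw [if_neg hilt]
      have := ihr (i - lsz) hr (by omega)
      refine ⟨?_, rfl, hlsz, hl, this.2⟩
      simp only [segToList, this.1, List.set_append]
      rw [if_neg (by omega), hlsz]

lemma ff_eq_set : ∀ (L : List Lvl) (c0 : Int) (c : List Int)
    (h : (L.map lastVal).findIdx (fun x => decide (x < c0)) < L.length),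
    ff L c0 c = L.set ((L.map lastVal).findIdx (fun x => decide (x < c0)))
      (L[(L.map lastVal).findIdx (fun x => decide (x < c0))]'h ++ [c]) := by
  intro L
  induction L with
  | nil => intro c0 c h; simp at h
  | cons lv rest ih =>
    intro c0 c h
    by_cases hc : lastVal lv < c0
    · simp [ff, hc, List.findIdx_cons]
    · simp only [List.map_cons, List.findIdx_cons, hc] at h ⊢
      simp only [ff, if_neg hc]
      have h' : (rest.map lastVal).findIdx (fun x => decide (x < c0)) < rest.length := by
        simpa using h
      rw [ih c0 c h']
      simp

lemma ff_eq_append : ∀ (L : List Lvl) (c0 : Int) (c : List Int),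
    ¬ ((L.map lastVal).findIdx (fun x => decide (x < c0)) < L.length) →
    ff L c0 c = L ++ [[c]] := by
  intro L
  induction L with
  | nil => intro c0 c _; simp [ff]
  | cons lv rest ih =>
    intro c0 c h
    by_cases hc : lastVal lv < c0
    · exfalso
      apply h
      simp [List.findIdx_cons, hc]
    · simp only [List.map_cons, List.findIdx_cons, hc] at h
      simp only [ff, if_neg hc, List.cons_append]
      rw [ih c0 c (by simpa using h)]

lemma foldB_eq : ∀ (vals : List (List Int)) (levels : List Lvl) (tree : Seg) (n : Nat),
    (∀ c ∈ vals, c ≠ [] ∧ ∀ x ∈ c, -2147483648 ≤ x) →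
    segWF tree →
    segToList tree = levels.map lastVal ++ List.replicate (n - levels.length) segSent →
    levels.length + vals.length ≤ n →
    (vals.foldl stepB (tree, levels)).2 = vals.foldl (fun L c => ff L (c.headD 0) c) levels := by
  intro vals
  induction vals with
  | nil => intros; simp
  | cons c cs ih =>
    intro levels tree n hval hwf htl hlen
    obtain ⟨hc, hbound⟩ := hval c List.mem_cons_self
    simp only [List.length_cons] at hlen
    have hKn : levels.length < n := by omega
    simp only [List.foldl_cons]
    have hstep : stepB (tree, levels) c =
        (segUpdate tree (segFind tree (c.headD 0)) (c.getLastD 0),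
          if segFind tree (c.headD 0) = levels.length then levels ++ [[c]]
          else levels.modify (segFind tree (c.headD 0)) (fun lv => lv ++ [c])) := by
      simp only [stepB, pyGet?_zero' c 0 hc, pyGet?_neg_one' c 0 hc]
    have hc0 : segSent < c.headD 0 := by
      have hmem : c.headD 0 ∈ c := by cases c with | nil => exact absurd rfl hc | cons x xs => simp
      have := hbound _ hmem
      simp only [segSent]
      omega
    have hlenTL : (segToList tree).length = n := by
      rw [htl]
      simp only [List.length_append, List.length_map, List.length_replicate]
      omega
    have hmn : tree.mn < c.headD 0 := by
      have hsentmem : segSent ∈ segToList tree := by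
        rw [htl]
        refine List.mem_append_right _ ?_
        exact List.mem_replicate.mpr ⟨by omega, rfl⟩
      exact lt_of_le_of_lt (mn_le tree hwf _ hsentmem) hc0
    have hfind : segFind tree (c.headD 0)
        = (segToList tree).findIdx (fun x => decide (x < c.headD 0)) := segFind_eq tree _ hwf hmn
    have hifind : segFind tree (c.headD 0) < n := by
      rw [hfind, ← hlenTL]
      exact List.findIdx_lt_length.mpr ⟨tree.mn, mn_mem tree hwf, by simpa using hmn⟩
    have hupd := segUpdate_spec tree (segFind tree (c.headD 0)) (c.getLastD 0) hwf (by omega)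
    set j := (levels.map lastVal).findIdx (fun x => decide (x < c.headD 0)) with hj
    by_cases hjlt : j < levels.length
    · -- first fit inside the existing levels
      have hjlt' : j < (levels.map lastVal).length := by simpa using hjlt
      have hieq : segFind tree (c.headD 0) = j := by
        rw [hfind, htl, List.findIdx_append, if_pos hjlt']
      have hne : segFind tree (c.headD 0) ≠ levels.length := by omega
      rw [hstep, if_neg hne, hieq]
      have hffeq : levels.modify j (fun lv => lv ++ [c]) = ff levels (c.headD 0) c := by
        rw [List.modify_eq_set_get _ hjlt, ff_eq_set levels (c.headD 0) c hjlt]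
        simp only [List.get_eq_getElem]
        exact rfl
      rw [hieq] at hupd
      rw [hffeq]
      refine ih (ff levels (c.headD 0) c) _ n (fun y hy => hval y (List.mem_cons_of_mem _ hy))
        hupd.2 ?_ ?_
      · rw [hupd.1, htl, List.set_append, if_pos hjlt', ← hffeq]
        rw [List.modify_eq_set_get _ hjlt, List.map_set, List.length_set]
        congr 2
        show c.getLastD 0 = lastVal (levels.get ⟨j, hjlt⟩ ++ [c])
        rw [lastVal, List.getLastD_concat]
      · rw [← hffeq, List.length_modify]; omega
    · -- new level
      have hjeq : j = (levels.map lastVal).length := by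
        have := List.findIdx_le_length (p := fun x => decide (x < c.headD 0)) (xs := levels.map lastVal)
        simp only [List.length_map] at *
        omega
      have hrep : List.replicate (n - levels.length) segSent
          = segSent :: List.replicate (n - levels.length - 1) segSent := by
        rw [← List.replicate_succ]
        congr 1
        omega
      have hieq : segFind tree (c.headD 0) = levels.length := by
        rw [hfind, htl, List.findIdx_append, if_neg (by simp only [List.length_map] at hjeq ⊢; omega)]
        rw [hrep]
        simp only [List.findIdx_cons, hc0, decide_true, cond_true, List.length_map]
        omega
      rw [hieq] at hupd
      rw [hstep, if_pos hieq, hieq]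
      have hffeq : levels ++ [[c]] = ff levels (c.headD 0) c := (ff_eq_append levels _ c hjlt).symm
      rw [hffeq]
      refine ih (ff levels (c.headD 0) c) _ n (fun y hy => hval y (List.mem_cons_of_mem _ hy))
        hupd.2 ?_ ?_
      · rw [hupd.1, htl, List.set_append,
          if_neg (by simp only [List.length_map]; omega), ← hffeq]
        simp only [List.length_map, Nat.sub_self, hrep, List.set_cons_zero]
        rw [List.map_append]
        simp only [List.map_cons, List.map_nil]
        rw [show lastVal [c] = c.getLastD 0 from rfl]
        rw [List.append_assoc]
        simp only [List.length_append, List.length_cons, List.length_nil, List.cons_append,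
          List.nil_append]
        have hcount : n - levels.length - 1 = n - (levels.length + (0 + 1)) := by omega
        rw [hcount]
      · rw [← hffeq]
        simp only [List.length_append, List.length_cons, List.length_nil]
        omega

lemma pairs_enum : ∀ (ls : List Lvl) (s : Int),
    (PySem.List.enumerate ls s).map (fun p => (PySem.Int.toStr (p.1 + 1), p.2)) = pairsFrom s ls := by
  intro ls
  induction ls with
  | nil => intro s; simp [pairsFrom, PySem.List.enumerate_nil]
  | cons lv rest ih => intro s; simp [pairsFrom, PySem.List.enumerate_cons, ih (s + 1)]

-- ===== VERDICT (by name: the statement is the Claim_ definition above) =====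
theorem get_depth_jumpers_spec : Claim_equal_get_depth_jumpers := by
  intro jw hdom hpre
  unfold Spec_get_depth_jumpers get_depth_jumpers get_depth_jumpers_alt
  obtain ⟨hnodup, hne⟩ := hpre
  by_cases hjw : jw = []
  · subst hjw; rfl
  · have hlen0 : (jw.map (·.2)).length = jw.length := List.length_map ..
    have hpos : 1 ≤ (jw.map (·.2)).length := by
      rw [hlen0]
      exact List.length_pos_of_ne_nil hjw
    have hvals_ne : ∀ c ∈ jw.map (·.2), c ≠ [] := by
      intro c hcm
      obtain ⟨p, hp, rfl⟩ := List.mem_map.mp hcm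
      exact hne p hp
    have hA := foldA_eq (jw.map (·.2)) [] jw.length hvals_ne
      (fun lv h => absurd h (List.not_mem_nil))
      (by rw [List.length_nil, Nat.zero_add, hlen0])
    have hdom' : ∀ c ∈ jw.map (·.2), c ≠ [] ∧ ∀ x ∈ c, -2147483648 ≤ x := by
      intro c hcm
      refine ⟨hvals_ne c hcm, ?_⟩
      obtain ⟨p, hp, rfl⟩ := List.mem_map.mp hcm
      intro x hx
      unfold Dom_get_depth_jumpers at hdom
      rw [List.all_eq_true] at hdom
      have hq := hdom p hp
      rw [Bool.and_eq_true, List.all_eq_true] at hq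
      have h2 := hq.2 x hx
      unfold pvDomInt at h2
      simp only [decide_eq_true_eq] at h2
      exact h2.1
    have hbuild := segBuild_spec (jw.map (·.2)).length hpos
    have hB := foldB_eq (jw.map (·.2)) [] (segBuild (jw.map (·.2)).length)
      (jw.map (·.2)).length hdom' hbuild.2
      (by rw [hbuild.1]; simp) (by simp)
    have hAfold : ∀ (init : PySem.Dict String Lvl) (l : List (Int × List Int)),
        l.foldl (fun result p => innerA (PySem.List.pyRange 1 ((jw.length : Int) + 1)) result p.2) init
          = (l.map (fun x => x.2)).foldl
              (fun d c => innerA (PySem.List.pyRange 1 ((jw.length : Int) + 1)) d c) init := by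
      intro init l
      induction l generalizing init with
      | nil => rfl
      | cons p ps ih => simp only [List.foldl_cons, List.map_cons, ih]
    rw [hAfold]
    have hempty : (PySem.Dict.empty : PySem.Dict String Lvl) = PySem.Dict.mk (pairsFrom 0 ([] : List Lvl)) := rfl
    rw [hempty, hA]
    have hcz : ¬ ((jw.map (fun x => x.2)).length = 0) := by omega
    simp only [if_neg hcz, hB]
    exact (pairs_enum _ 0).symm
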